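-- pv_equiv track=rewrite | github.com/sushrutjog/chord-diagrams | enumeration.py | check_isometry
-- ===== SOURCE A (Python) =====
-- def check_isometry(current_pair, pairs_output):
--     """
--     checks if two diagrams differ by a rotation.
--
--     determines if the pairs_output and current_pair differ by a constant c in the range 0 to k-1
--     """
--
--     # check if the number of chord are different
--     if len(current_pair) != len(pairs_output):
--         return False
--
--     # edge case: empty diagrams are always isomorphic
--     num_pairs = len(current_pair)
--     if num_pairs == 0:
--         return True
--     k = 2 * num_pairs
--
--     # create a canonical representation using set -- O(1) average case lookups.
--     # canonical pairing sorts each pair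
--     canonical_set = {tuple(sorted(p)) for p in current_pair}
--
--     # check for all possible rotational differences
--     for c in range(k):
--         transformed_pairs = set()
--
--         # apply the current rotation c to the second list
--         for p1, p2 in pairs_output:
--             # work in mod k
--             new_p1 = (p1 - 1 + c) % k + 1
--             new_p2 = (p2 - 1 + c) % k + 1
--
--             transformed_pairs.add(tuple(sorted((new_p1, new_p2))))
--
--         # compare the resultant set with the canonical pairing.
--         if transformed_pairs == canonical_set:
--             return True
--
--     # return false if they don't differ by a rotation
--     return False
-- ===== SOURCE B (Python) =====
-- def check_isometry(current_pair, pairs_output):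
--     if len(current_pair) != len(pairs_output):
--         return False
--     if not current_pair:
--         return True
--     k = 2 * len(current_pair)
--     canon = {tuple(sorted(p)) for p in current_pair}
--     a0, b0 = pairs_output[0]
--     # anchor the first pair of pairs_output: any successful rotation must send it
--     # onto some canonical pair, which pins the rotation constant down to <= 2n candidates
--     candidates = {(x - a0) % k for (x, _) in canon} | {(x - b0) % k for (x, _) in canon}
--     for c in candidates:
--         transformed = {tuple(sorted(((p - 1 + c) % k + 1, (q - 1 + c) % k + 1)))
--                        for (p, q) in pairs_output}
--         if transformed == canon:
--             return True
--     return False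
-- ===== Notes on version B (the rewrite author's own statement) =====
-- stated objective: alternative
-- what changed: Instead of trying all k=2n rotation constants, B anchors the first pair of pairs_output: a successful rotation must send it onto some canonical pair, which yields at most 2n candidate constants (deduplicated as a set), and only those candidate rotations are tested.
import Mathlib
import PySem

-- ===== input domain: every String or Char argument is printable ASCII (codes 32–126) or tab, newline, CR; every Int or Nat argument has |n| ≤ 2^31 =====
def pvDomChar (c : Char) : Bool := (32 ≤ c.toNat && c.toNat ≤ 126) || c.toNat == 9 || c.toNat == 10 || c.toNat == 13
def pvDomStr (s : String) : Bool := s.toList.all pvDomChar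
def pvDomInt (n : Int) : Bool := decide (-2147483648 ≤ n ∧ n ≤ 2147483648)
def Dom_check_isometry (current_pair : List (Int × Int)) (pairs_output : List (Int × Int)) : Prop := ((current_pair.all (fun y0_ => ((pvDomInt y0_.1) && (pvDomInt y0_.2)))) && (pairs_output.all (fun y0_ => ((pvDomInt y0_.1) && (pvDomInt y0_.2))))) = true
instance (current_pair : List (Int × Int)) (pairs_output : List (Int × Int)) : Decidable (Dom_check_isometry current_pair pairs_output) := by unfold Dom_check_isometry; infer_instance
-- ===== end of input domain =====

-- B replaces A's exhaustive scan of all k rotations by checking only the ≤ 2n rotation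
-- constants that map the first pair of pairs_output onto some canonical pair (alternative
-- candidate-generation algorithm; equal return value on every input).

-- ===== PORT A =====
-- tuple(sorted(p)) for a 2-tuple p: exact (sorting a pair is min/max)
def pvSortPair (p : Int × Int) : Int × Int := if p.1 ≤ p.2 then p else (p.2, p.1)

-- the per-pair rotation both Pythons apply: tuple(sorted(((p-1+c)%k+1, (q-1+c)%k+1)))
def pvRotPair (k c : Int) (p : Int × Int) : Int × Int :=
  pvSortPair (PySem.Int.mod (p.1 - 1 + c) k + 1, PySem.Int.mod (p.2 - 1 + c) k + 1)

def check_isometry (current_pair : List (Int × Int)) (pairs_output : List (Int × Int)) : Bool :=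
  if PySem.List.len current_pair ≠ PySem.List.len pairs_output then false
  else
    let num_pairs := PySem.List.len current_pair
    if num_pairs = 0 then true
    else
      let k := 2 * num_pairs
      let canonical_set := PySem.Set.ofList (current_pair.map pvSortPair)
      -- for c in range(k): build transformed set, compare, return True on first match
      (PySem.List.pyRange 0 k 1).any (fun c =>
        PySem.Set.equal (PySem.Set.ofList (pairs_output.map (pvRotPair k c))) canonical_set)

-- ===== PORT B =====
def check_isometry_alt (current_pair : List (Int × Int)) (pairs_output : List (Int × Int)) : Bool :=
  if PySem.List.len current_pair ≠ PySem.List.len pairs_output then false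
  else if current_pair = [] then true
  else
    let k := 2 * PySem.List.len current_pair
    let canon := PySem.Set.ofList (current_pair.map pvSortPair)
    -- pairs_output[0]; the default never fires: lengths are equal and current_pair ≠ []
    let p0 := pairs_output.headD (0, 0)
    let candidates := PySem.Set.union
        (PySem.Set.ofList (canon.map (fun t => PySem.Int.mod (t.1 - p0.1) k)))
        (canon.map (fun t => PySem.Int.mod (t.1 - p0.2) k))
    candidates.any (fun c =>
      PySem.Set.equal (PySem.Set.ofList (pairs_output.map (pvRotPair k c))) canon)

-- ===== PRECONDITION & SPEC =====
def Spec_check_isometry (current_pair : List (Int × Int)) (pairs_output : List (Int × Int)) (out : Bool) : Prop := out = check_isometry_alt current_pair pairs_output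
instance (current_pair : List (Int × Int)) (pairs_output : List (Int × Int)) (out : Bool) : Decidable (Spec_check_isometry current_pair pairs_output out) := by unfold Spec_check_isometry; infer_instance

-- ===== CLAIM (what is proved, stated in full; the proofs are below) =====
def Claim_equal_check_isometry : Prop := ∀ (current_pair : List (Int × Int)) (pairs_output : List (Int × Int)), Dom_check_isometry current_pair pairs_output → Spec_check_isometry current_pair pairs_output (check_isometry current_pair pairs_output)

-- ===== LEMMAS AND PROOFS =====

-- ((a - 1 + c) % k + 1 - a) % k = c when 0 ≤ c < k: the rotation constant is recovered
-- from the image of an endpoint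
theorem pv_mod_cancel (k c a : Int) (hk : 0 < k) (h0 : 0 ≤ c) (hc : c < k) :
    PySem.Int.mod (PySem.Int.mod (a - 1 + c) k + 1 - a) k = c := by
  rw [PySem.Int.mod_eq_emod_of_pos hk, PySem.Int.mod_eq_emod_of_pos hk]
  have hdm := Int.mul_ediv_add_emod (a - 1 + c) k
  have h1 : (a - 1 + c) % k + 1 - a = c + k * (-((a - 1 + c) / k)) := by
    rw [mul_neg]; omega
  rw [h1, Int.add_mul_emod_self_left]
  exact Int.emod_eq_of_lt h0 hc

-- if rotation c (0 ≤ c < k) makes the transformed set equal canon, then c is among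
-- B's candidate constants derived from the anchor pair p0
theorem pv_anchor_mem (k c : Int) (canon : PySem.Set (Int × Int)) (p0 : Int × Int)
    (tl : List (Int × Int)) (hk : 0 < k) (h0 : 0 ≤ c) (hc : c < k)
    (heq : PySem.Set.equal (PySem.Set.ofList ((p0 :: tl).map (pvRotPair k c))) canon = true) :
    c ∈ PySem.Set.union
        (PySem.Set.ofList (canon.map (fun t => PySem.Int.mod (t.1 - p0.1) k)))
        (canon.map (fun t => PySem.Int.mod (t.1 - p0.2) k)) := by
  have hmem : pvRotPair k c p0 ∈ canon := by
    have := ((PySem.Set.equal_iff _ _).mp heq (pvRotPair k c p0)).mp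
    apply this
    rw [PySem.Set.mem_ofList]
    simp
  rw [PySem.Set.mem_union, PySem.Set.mem_ofList]
  have h1 : (pvRotPair k c p0).1 = PySem.Int.mod (p0.1 - 1 + c) k + 1 ∨
      (pvRotPair k c p0).1 = PySem.Int.mod (p0.2 - 1 + c) k + 1 := by
    unfold pvRotPair pvSortPair
    split
    · left; rfl
    · right; rfl
  rcases h1 with h1 | h1
  · left
    refine List.mem_map.mpr ⟨pvRotPair k c p0, hmem, ?_⟩
    rw [h1, pv_mod_cancel k c p0.1 hk h0 hc]
  · right
    refine List.mem_map.mpr ⟨pvRotPair k c p0, hmem, ?_⟩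
    rw [h1, pv_mod_cancel k c p0.2 hk h0 hc]

-- every candidate of B lies in range(k)
theorem pv_cand_range (k : Int) (canon : PySem.Set (Int × Int)) (p0 : Int × Int)
    (hk : 0 < k) (c : Int)
    (hc : c ∈ PySem.Set.union
        (PySem.Set.ofList (canon.map (fun t => PySem.Int.mod (t.1 - p0.1) k)))
        (canon.map (fun t => PySem.Int.mod (t.1 - p0.2) k))) :
    0 ≤ c ∧ c < k := by
  rw [PySem.Set.mem_union, PySem.Set.mem_ofList] at hc
  rcases hc with hc | hc <;>
    · rcases List.mem_map.mp hc with ⟨t, _, rfl⟩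
      exact ⟨PySem.Int.mod_nonneg _ hk, PySem.Int.mod_lt _ hk⟩

-- ===== VERDICT (by name: the statement is the Claim_ definition above) =====
theorem check_isometry_spec : Claim_equal_check_isometry := by
  intro cp po _
  unfold Spec_check_isometry
  simp only [check_isometry, check_isometry_alt, PySem.List.len_eq]
  split_ifs with h1 h2 h3 h4
  · rfl
  · rfl
  · exact absurd (List.length_eq_zero_iff.mp (by exact_mod_cast h2)) h3
  · exact absurd (by simp [h4] : (cp.length : Int) = 0) h2
  · -- main case: equal lengths, nonempty
    obtain ⟨p0, tl, rfl⟩ : ∃ p0 tl, po = p0 :: tl := by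
      cases po with
      | nil => exact absurd (by simpa using h1) h4
      | cons a l => exact ⟨a, l, rfl⟩
    have hk : (0 : Int) < 2 * (cp.length : Int) := by
      have : 0 < cp.length := List.length_pos_iff.mpr h4
      omega
    simp only [List.headD_cons]
    rw [Bool.eq_iff_iff]
    simp only [List.any_eq_true]
    constructor
    · rintro ⟨c, hcmem, hfc⟩
      rw [PySem.List.mem_pyRange_one] at hcmem
      exact ⟨c, pv_anchor_mem _ c _ p0 tl hk hcmem.1 hcmem.2 hfc, hfc⟩
    · rintro ⟨c, hcmem, hfc⟩
      obtain ⟨hge, hlt⟩ := pv_cand_range _ _ p0 hk c hcmem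
      exact ⟨c, PySem.List.mem_pyRange_one.mpr ⟨hge, hlt⟩, hfc⟩
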